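-- pv_equiv track=rewrite | github.com/ImFlashh/my_twitter | hack_power.py | hack_calculator
-- ===== SOURCE A (Python) =====
-- powers = {'a': 1,
--           'b': 2,
--           'c': 3}
--
-- def hack_calculator(hack):
--     try:
--         result = 0
--         multiply = {'a': 0, 'b': 0, 'c': 0}  # słownik do zliczania ilości wystąpień liter
--         for element in hack:
--             multiply[element] += 1
--             if element in powers:
--                 result += powers[element] * multiply[element]
--
--         if 'baa' in hack:
--             result += (hack.count('baa') * 20)  # wycinam bonusy 'baa' żeby 'ba' nie bonusowało ponownie
--             hack = hack.replace('baa', '')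
--         if 'ba' in hack:
--             result += (hack.count('ba') * 10)
--         return result
--     except KeyError:
--         return 0
-- ===== SOURCE B (Python) =====
-- powers = {'a': 1,
--           'b': 2,
--           'c': 3}
--
-- def _tri(n):
--     return n * (n + 1) // 2
--
-- def hack_calculator(hack):
--     if any(ch not in ('a', 'b', 'c') for ch in hack):
--         return 0
--     na, nb, nc = hack.count('a'), hack.count('b'), hack.count('c')
--     result = _tri(na) + 2 * _tri(nb) + 3 * _tri(nc)
--     if 'baa' in hack:
--         result += hack.count('baa') * 20
--         hack = hack.replace('baa', '')
--     if 'ba' in hack: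
--         result += hack.count('ba') * 10
--     return result
-- ===== Notes on version B (the rewrite author's own statement) =====
-- stated objective: simpler
-- what changed: Replaces the running-tally dict and per-character incremental scoring (weight * occurrence-so-far added each step, aborted by a caught KeyError) with a single validity check plus three str.count calls and the closed form weight * n*(n+1)//2 per letter; the baa/ba bonus block is unchanged.
import Mathlib
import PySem

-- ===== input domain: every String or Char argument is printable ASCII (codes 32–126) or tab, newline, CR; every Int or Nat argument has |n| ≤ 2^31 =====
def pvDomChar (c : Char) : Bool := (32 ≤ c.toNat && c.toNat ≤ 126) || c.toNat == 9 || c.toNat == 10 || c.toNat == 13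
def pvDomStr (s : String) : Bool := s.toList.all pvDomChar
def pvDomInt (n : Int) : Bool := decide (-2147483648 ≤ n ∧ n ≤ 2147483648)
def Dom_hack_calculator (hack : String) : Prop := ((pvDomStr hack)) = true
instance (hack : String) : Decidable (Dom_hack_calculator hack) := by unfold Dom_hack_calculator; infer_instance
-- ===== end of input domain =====

-- B replaces A's running-tally dict and per-character incremental scoring (KeyError -> 0)
-- with a validity check plus closed-form per-letter triangle scores; same cost, simpler.


-- ===== PORT A =====
-- module-level 'powers' dict
def powersDict : PySem.Dict Char Int := PySem.Dict.mk [('a', 1), ('b', 2), ('c', 3)]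

-- the 'for element in hack' loop inside the try-block; 'none' = KeyError (caught, -> 0)
def hackLoopA : List Char → Int → PySem.Dict Char Int → Option Int
  | [], result, _ => some result
  | e :: rest, result, multiply =>
    match multiply.get? e with
    | none => none
    | some m =>
      let multiply := multiply.insert e (m + 1)
      let result := if powersDict.contains e
                    then result + powersDict.getD e 0 * multiply.getD e 0
                    else result
      hackLoopA rest result multiply

def hack_calculator (hack : String) : Int :=
  match hackLoopA hack.toList 0 (PySem.Dict.mk [('a', 0), ('b', 0), ('c', 0)]) with
  | none => 0
  | some result =>
    let p := if PySem.Str.isIn "baa" hack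
             then (result + (PySem.Str.count hack "baa" : Int) * 20, PySem.Str.replace hack "baa" "")
             else (result, hack)
    if PySem.Str.isIn "ba" p.2 then p.1 + (PySem.Str.count p.2 "ba" : Int) * 10 else p.1

-- ===== PORT B =====
-- _tri(n) = n*(n+1)//2
def triHalf (n : Int) : Int := PySem.Int.floordiv (n * (n + 1)) 2

def hack_calculator_alt (hack : String) : Int :=
  if hack.toList.any (fun ch => !(['a', 'b', 'c'].contains ch)) then 0
  else
    let na : Int := (PySem.Str.count hack "a" : Int)
    let nb : Int := (PySem.Str.count hack "b" : Int)
    let nc : Int := (PySem.Str.count hack "c" : Int)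
    let result := triHalf na + 2 * triHalf nb + 3 * triHalf nc
    let p := if PySem.Str.isIn "baa" hack
             then (result + (PySem.Str.count hack "baa" : Int) * 20, PySem.Str.replace hack "baa" "")
             else (result, hack)
    if PySem.Str.isIn "ba" p.2 then p.1 + (PySem.Str.count p.2 "ba" : Int) * 10 else p.1

-- ===== PRECONDITION & SPEC =====
def Spec_hack_calculator (hack : String) (out : Int) : Prop := out = hack_calculator_alt hack
instance (hack : String) (out : Int) : Decidable (Spec_hack_calculator hack out) := by unfold Spec_hack_calculator; infer_instance

-- ===== CLAIM (what is proved, stated in full; the proofs are below) =====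
def Claim_equal_hack_calculator : Prop := ∀ (hack : String), Dom_hack_calculator hack → Spec_hack_calculator hack (hack_calculator hack)

-- ===== LEMMAS AND PROOFS =====

-- Python's n*(n+1)//2 steps by n+1
theorem triHalf_succ (n : Int) : triHalf (n + 1) = triHalf n + (n + 1) := by
  unfold triHalf PySem.Int.floordiv
  have h : (n + 1) * (n + 1 + 1) = n * (n + 1) + (n + 1) * 2 := by ring
  rw [h, Int.add_mul_fdiv_right _ _ (by norm_num)]

-- single-character str.count is List.count: the go-worker with enough fuel
theorem count_go_singleton (c : Char) : ∀ (fuel : Nat) (l : List Char) (acc : Nat),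
    l.length ≤ fuel → PySem.Chars.count.go [c] fuel l acc = acc + l.count c := by
  intro fuel
  induction fuel with
  | zero => intro l acc h; cases l with
    | nil => simp [PySem.Chars.count.go]
    | cons a t => simp at h
  | succ n ih =>
    intro l acc h
    cases l with
    | nil => simp [PySem.Chars.count.go]
    | cons a t =>
      rw [PySem.Chars.count.go]
      simp only [List.isPrefixOf, List.length_cons] at *
      by_cases hc : c = a
      · subst hc
        simp [List.count_cons, ih t (acc+1) (by omega)]
        omega
      · have hf : (c == a) = false := by simp [hc]
        rw [List.count_cons]
        simp [hf, ih t acc (by omega)]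
        exact fun h' => hc h'.symm

theorem chars_count_singleton (c : Char) (s : List Char) : PySem.Chars.count s [c] = s.count c := by
  unfold PySem.Chars.count
  simp [count_go_singleton c s.length s 0 le_rfl]

-- characterisation of A's try-block loop over a state dict with keys a,b,c
theorem hackLoopA_char (l : List Char) : ∀ (x y z r : Int),
    hackLoopA l r (PySem.Dict.mk [('a', x), ('b', y), ('c', z)]) =
      if l.all (fun c => c == 'a' || c == 'b' || c == 'c') then
        some (r + (triHalf (x + l.count 'a') - triHalf x)
                + 2 * (triHalf (y + l.count 'b') - triHalf y)
                + 3 * (triHalf (z + l.count 'c') - triHalf z))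
      else none := by
  induction l with
  | nil => intro x y z r; simp [hackLoopA]
  | cons e rest ih =>
    intro x y z r
    by_cases ha : e = 'a'
    · subst ha
      have hins : (PySem.Dict.mk [('a', x), ('b', y), ('c', z)]).insert 'a' (x + 1)
          = PySem.Dict.mk [('a', x + 1), ('b', y), ('c', z)] := by
        simp [PySem.Dict.insert, PySem.Dict.contains]
      have hget : (PySem.Dict.mk [('a', x), ('b', y), ('c', z)]).get? 'a' = some x := by
        simp [PySem.Dict.get?]
      have hgd : (PySem.Dict.mk [('a', x + 1), ('b', y), ('c', z)]).getD 'a' 0 = x + 1 := by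
        simp [PySem.Dict.getD, PySem.Dict.get?]
      simp only [hackLoopA, hget, hins]
      norm_num [powersDict, PySem.Dict.contains, hgd]
      rw [ih]
      by_cases hall : (rest.all fun c => c == 'a' || c == 'b' || c == 'c') = true
      · simp [hall, List.count_cons]
        push_cast
        have h2 : x + 1 + (rest.count 'a' : Int) = x + ((rest.count 'a' : Int) + 1) := by ring
        rw [h2]
        refine ⟨by simpa using hall, ?_⟩
        have hp : (PySem.Dict.mk [('a', (1:Int)), ('b', 2), ('c', 3)]).getD 'a' 0 = 1 := by
          simp [PySem.Dict.getD, PySem.Dict.get?]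
        rw [hp]
        linarith [triHalf_succ x]
      · simp [hall]
        simpa using hall
    · by_cases hb : e = 'b'
      · subst hb
        have hins : (PySem.Dict.mk [('a', x), ('b', y), ('c', z)]).insert 'b' (y + 1)
            = PySem.Dict.mk [('a', x), ('b', y + 1), ('c', z)] := by
          simp [PySem.Dict.insert, PySem.Dict.contains]
        have hget : (PySem.Dict.mk [('a', x), ('b', y), ('c', z)]).get? 'b' = some y := by
          simp [PySem.Dict.get?]
        have hgd : (PySem.Dict.mk [('a', x), ('b', y + 1), ('c', z)]).getD 'b' 0 = y + 1 := by
          simp [PySem.Dict.getD, PySem.Dict.get?]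
        simp only [hackLoopA, hget, hins]
        norm_num [powersDict, PySem.Dict.contains, hgd]
        rw [ih]
        by_cases hall : (rest.all fun c => c == 'a' || c == 'b' || c == 'c') = true
        · simp [hall, List.count_cons]
          push_cast
          have h2 : y + 1 + (rest.count 'b' : Int) = y + ((rest.count 'b' : Int) + 1) := by ring
          rw [h2]
          refine ⟨by simpa using hall, ?_⟩
          have hp : (PySem.Dict.mk [('a', (1:Int)), ('b', 2), ('c', 3)]).getD 'b' 0 = 2 := by
            simp [PySem.Dict.getD, PySem.Dict.get?]
          rw [hp]
          linarith [triHalf_succ y]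
        · simp [hall]
          simpa using hall
      · by_cases hc : e = 'c'
        · subst hc
          have hins : (PySem.Dict.mk [('a', x), ('b', y), ('c', z)]).insert 'c' (z + 1)
              = PySem.Dict.mk [('a', x), ('b', y), ('c', z + 1)] := by
            simp [PySem.Dict.insert, PySem.Dict.contains]
          have hget : (PySem.Dict.mk [('a', x), ('b', y), ('c', z)]).get? 'c' = some z := by
            simp [PySem.Dict.get?]
          have hgd : (PySem.Dict.mk [('a', x), ('b', y), ('c', z + 1)]).getD 'c' 0 = z + 1 := by
            simp [PySem.Dict.getD, PySem.Dict.get?]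
          simp only [hackLoopA, hget, hins]
          norm_num [powersDict, PySem.Dict.contains, hgd]
          rw [ih]
          by_cases hall : (rest.all fun c => c == 'a' || c == 'b' || c == 'c') = true
          · simp [hall, List.count_cons]
            push_cast
            have h2 : z + 1 + (rest.count 'c' : Int) = z + ((rest.count 'c' : Int) + 1) := by ring
            rw [h2]
            refine ⟨by simpa using hall, ?_⟩
            have hp : (PySem.Dict.mk [('a', (1:Int)), ('b', 2), ('c', 3)]).getD 'c' 0 = 3 := by
              simp [PySem.Dict.getD, PySem.Dict.get?]
            rw [hp]
            linarith [triHalf_succ z]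
          · simp [hall]
            simpa using hall
        · have ha' : ('a' == e) = false := by simp; exact fun h => ha h.symm
          have hb' : ('b' == e) = false := by simp; exact fun h => hb h.symm
          have hc' : ('c' == e) = false := by simp; exact fun h => hc h.symm
          have hget : (PySem.Dict.mk [('a', x), ('b', y), ('c', z)]).get? e = none := by
            simp [PySem.Dict.get?, ha', hb', hc']
          simp only [hackLoopA, hget]
          simp [List.all_cons, ha, hb, hc]

theorem main_eq (hack : String) : hack_calculator hack = hack_calculator_alt hack := by
  unfold hack_calculator hack_calculator_alt
  rw [hackLoopA_char]
  by_cases hall : (hack.toList.all fun c => c == 'a' || c == 'b' || c == 'c') = true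
  · rw [if_pos hall]
    have hany : (hack.toList.any fun ch => !(['a', 'b', 'c'].contains ch)) = false := by
      simp only [List.all_eq_true] at hall
      simp only [List.any_eq_false]
      intro ch hm
      have := hall ch hm
      simp at this ⊢
      tauto
    rw [hany]
    have hR : (0 : Int) + (triHalf (0 + (hack.toList.count 'a' : Int)) - triHalf 0)
        + 2 * (triHalf (0 + (hack.toList.count 'b' : Int)) - triHalf 0)
        + 3 * (triHalf (0 + (hack.toList.count 'c' : Int)) - triHalf 0)
        = triHalf (PySem.Str.count hack "a" : Int) + 2 * triHalf (PySem.Str.count hack "b" : Int)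
          + 3 * triHalf (PySem.Str.count hack "c" : Int) := by
      have h0 : triHalf 0 = 0 := by decide
      have ha : (PySem.Str.count hack "a" : Int) = (hack.toList.count 'a' : Int) := by
        simp [chars_count_singleton]
      have hb : (PySem.Str.count hack "b" : Int) = (hack.toList.count 'b' : Int) := by
        simp [chars_count_singleton]
      have hc : (PySem.Str.count hack "c" : Int) = (hack.toList.count 'c' : Int) := by
        simp [chars_count_singleton]
      rw [ha, hb, hc, h0]
      ring_nf
    simp only [Bool.false_eq_true, if_false, hR]
  · rw [if_neg hall]
    have hany : (hack.toList.any fun ch => !(['a', 'b', 'c'].contains ch)) = true := by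
      simp only [List.all_eq_true] at hall
      push Not at hall
      obtain ⟨ch, hm, hch⟩ := hall
      simp only [List.any_eq_true]
      refine ⟨ch, hm, ?_⟩
      simp at hch ⊢
      tauto
    rw [hany]
    simp

-- ===== VERDICT (by name: the statement is the Claim_ definition above) =====
theorem hack_calculator_spec : Claim_equal_hack_calculator := by
  intro hack _
  exact main_eq hack
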